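-- pv_equiv track=rewrite | github.com/bblais/Advent-of-Code-2021 | day21.py | rand100
-- ===== SOURCE A (Python) =====
-- def rand100(N=None):
--
--     if N is None:
--         while True:
--             for i in range(1,100+1):
--                 yield i
--     else:
--         count=0
--         i=1
--         while count<N:
--             yield i
--             count+=1
--             i+=1
--             if i>100:
--                 i=1
-- ===== SOURCE B (Python) =====
-- def rand100(N=None):
--     # Block decomposition: precompute the cycle once; for finite N emit whole
--     # copies of the cycle (divmod tells how many) and then a sliced partial block.
--     cycle = list(range(1, 101))
--     if N is None:
--         while True:
--             yield from cycle
--     else: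
--         n = max(N, 0)
--         q, r = divmod(n, 100)
--         for _ in range(q):
--             yield from cycle
--         yield from cycle[:r]
-- ===== Notes on version B (the rewrite author's own statement) =====
-- stated objective: alternative
-- what changed: Instead of A's element-by-element loops with a rolling counter reset past 100, B precomputes the 1..100 cycle once and emits it in whole blocks: divmod(max(N,0),100) gives the number of full cycles and the length of the final sliced partial cycle.
import Mathlib
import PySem

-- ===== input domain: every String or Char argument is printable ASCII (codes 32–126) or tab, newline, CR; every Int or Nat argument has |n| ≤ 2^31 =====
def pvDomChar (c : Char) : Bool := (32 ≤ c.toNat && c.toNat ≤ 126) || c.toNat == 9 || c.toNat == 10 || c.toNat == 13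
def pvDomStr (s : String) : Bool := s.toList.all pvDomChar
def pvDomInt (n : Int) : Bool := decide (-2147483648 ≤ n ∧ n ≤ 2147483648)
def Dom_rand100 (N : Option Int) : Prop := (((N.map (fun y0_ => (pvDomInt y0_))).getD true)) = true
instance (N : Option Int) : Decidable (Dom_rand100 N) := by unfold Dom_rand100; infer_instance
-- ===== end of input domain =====

-- B replaces A's element-by-element rolling-counter loop by block emission: one precomputed
-- 1..100 cycle, divmod giving the number of whole cycles and the sliced partial block; objective: alternative.
-- Both Pythons are generators; the ports return the full finite list of yielded values.

-- ===== PORT A =====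
-- A's finite branch: 'count=0; i=1; while count<N: yield i; count+=1; i+=1; if i>100: i=1'.
-- count runs 0,1,… so the body executes exactly max(N,0) = N.toNat times; the fuel is that
-- iteration count and i is the rolling state, updated exactly as in the Python.
def rand100Loop : Nat → Int → List Int
  | 0, _ => []
  | fuel + 1, i => i :: rand100Loop fuel (if i + 1 > 100 then 1 else i + 1)

def rand100 (N : Option Int) : List Int :=
  match N with
  | none => []          -- Python A never terminates on N=None; excluded by Pre_
  | some n => rand100Loop n.toNat 1

-- ===== PORT B =====
-- 'cycle = list(range(1, 101))'
def pvCycle : List Int := PySem.List.pyRange 1 101 1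

-- B: 'n = max(N,0); q, r = divmod(n, 100); for _ in range(q): yield from cycle; yield from cycle[:r]'.
-- cycle[:r] with 0 ≤ r = n % 100 is exactly List.take r.toNat.
def rand100_alt (N : Option Int) : List Int :=
  match N with
  | none => []          -- Python B never terminates on N=None; excluded by Pre_
  | some N' =>
    let n := max N' 0
    let q := PySem.Int.floordiv n 100
    let r := PySem.Int.mod n 100
    ((List.range q.toNat).foldl (fun acc _ => acc ++ pvCycle) []) ++ pvCycle.take r.toNat

-- ===== PRECONDITION & SPEC =====
-- Pre_ excludes N = None, on which both generators are infinite (no finite list of yields exists).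
def Pre_rand100 (N : Option Int) : Prop := N ≠ none
instance (N : Option Int) : Decidable (Pre_rand100 N) := by unfold Pre_rand100; infer_instance
def pvWitness_rand100 : Option Int := some 7

def Spec_rand100 (N : Option Int) (out : List Int) : Prop := out = rand100_alt N
instance (N : Option Int) (out : List Int) : Decidable (Spec_rand100 N out) := by unfold Spec_rand100; infer_instance

-- ===== CLAIM (what is proved, stated in full; the proofs are below) =====
def Claim_equal_rand100 : Prop := ∀ (N : Option Int), Dom_rand100 N → Pre_rand100 N → Spec_rand100 N (rand100 N)

-- ===== LEMMAS AND PROOFS =====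
-- A's state update, as a function, for splitting the loop
def pvNext (i : Int) : Int := if i + 1 > 100 then 1 else i + 1

theorem loop_split (a : Nat) : ∀ (b : Nat) (i : Int),
    rand100Loop (a + b) i = rand100Loop a i ++ rand100Loop b (pvNext^[a] i) := by
  induction a with
  | zero => intro b i; simp [rand100Loop]
  | succ k ih =>
    intro b i
    have h : k + 1 + b = (k + b) + 1 := by omega
    rw [h]
    show i :: rand100Loop (k + b) (pvNext i) = _
    rw [ih b (pvNext i), Function.iterate_succ_apply]
    rfl

theorem loop_len (fuel : Nat) : ∀ i : Int, (rand100Loop fuel i).length = fuel := by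
  induction fuel with
  | zero => intro i; rfl
  | succ k ih => intro i; simp [rand100Loop, ih]

set_option maxRecDepth 100000 in
theorem loop100 : rand100Loop 100 1 = pvCycle := by decide

set_option maxRecDepth 100000 in
theorem next_iter100 : pvNext^[100] 1 = 1 := by decide

-- base: a partial block is a prefix of the cycle
theorem loop_take (r : Nat) (hr : r ≤ 100) : rand100Loop r 1 = pvCycle.take r := by
  have h : (100 : Nat) = r + (100 - r) := by omega
  have := loop_split r (100 - r) 1
  rw [← h, loop100] at this
  have hlen : r = (rand100Loop r 1).length := (loop_len r 1).symm
  calc rand100Loop r 1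
      = (rand100Loop r 1 ++ rand100Loop (100 - r) (pvNext^[r] 1)).take (rand100Loop r 1).length := by
        rw [List.take_left]
    _ = pvCycle.take r := by rw [← this, ← hlen]

-- the whole-blocks part, in B's foldl form
theorem fold_comm (k : Nat) :
    ((List.range k).foldl (fun acc _ => acc ++ pvCycle) []) ++ pvCycle
      = pvCycle ++ (List.range k).foldl (fun acc _ => acc ++ pvCycle) [] := by
  induction k with
  | zero => rfl
  | succ m ih =>
    rw [List.range_succ, List.foldl_append]
    simp only [List.foldl_cons, List.foldl_nil]
    rw [← List.append_assoc, ih, List.append_assoc, ih]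

theorem loop_blocks (k : Nat) : ∀ r : Nat, r ≤ 100 →
    rand100Loop (100 * k + r) 1
      = ((List.range k).foldl (fun acc _ => acc ++ pvCycle) []) ++ pvCycle.take r := by
  induction k with
  | zero => intro r hr; simpa using loop_take r hr
  | succ m ih =>
    intro r hr
    have h : 100 * (m + 1) + r = 100 + (100 * m + r) := by ring
    rw [h, loop_split 100 (100 * m + r) 1, loop100, next_iter100, ih r hr,
        List.range_succ, List.foldl_append]
    simp only [List.foldl_cons, List.foldl_nil]
    rw [fold_comm, List.append_assoc]

-- ===== VERDICT (by name: the statement is the Claim_ definition above) =====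
theorem rand100_spec : Claim_equal_rand100 := by
  intro N _ hpre
  match N with
  | none => exact absurd rfl hpre
  | some n0 =>
    show rand100Loop n0.toNat 1 = _
    simp only [rand100_alt]
    set n : Int := max n0 0 with hn
    have hn0 : 0 ≤ n := le_max_right _ _
    rw [PySem.Int.floordiv_eq_ediv_of_pos (by norm_num), PySem.Int.mod_eq_emod_of_pos (by norm_num)]
    have hdm : 100 * (n / 100) + n % 100 = n := Int.mul_ediv_add_emod n 100
    have hq : 0 ≤ n / 100 := Int.ediv_nonneg hn0 (by norm_num)
    have hr1 : 0 ≤ n % 100 := Int.emod_nonneg n (by norm_num)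
    have hr2 : n % 100 < 100 := Int.emod_lt_of_pos n (by norm_num)
    have h1 : n0.toNat = 100 * (n / 100).toNat + (n % 100).toNat := by omega
    have h2 : (n % 100).toNat ≤ 100 := by omega
    rw [h1]
    exact loop_blocks (n / 100).toNat (n % 100).toNat h2
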